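-- pv_equiv track=rewrite | github.com/vsmaxim/pair-enumeration | pair.py | halfTalk
-- ===== SOURCE A (Python) =====
-- def talk(first, second):
--     return [(first[i], second[i]) for i in range(len(first))]
--
-- def permutate(a):
--     a.append(a.pop(0))
--     return a
--
-- def halfTalk(a):
--     left = generateHalfs(a)[0]
--     right = generateHalfs(a)[1]
--     res = []
--     for i in range(len(left)):
--             right = permutate(right)
--             res.append(talk(left, right))
--     return res
--
-- def generateHalfs(a):
--     middle = len(a) // 2
--     return a[:middle], a[middle:]
-- ===== SOURCE B (Python) =====
-- def generateHalfs(a):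
--     middle = len(a) // 2
--     return a[:middle], a[middle:]
--
-- def halfTalk(a):
--     left, right = generateHalfs(a)
--     n = len(left)
--     m = len(right)
--     return [[(left[i], right[(i + r) % m]) for i in range(n)]
--             for r in range(1, n + 1)]
-- ===== Notes on version B (the rewrite author's own statement) =====
-- stated objective: simpler
-- what changed: B replaces A's stateful loop that mutates the right half (pop-front/append rotation carried across rounds) by a stateless double comprehension that computes each round's partner directly with modular index arithmetic right[(i+r) % len(right)].
import Mathlib
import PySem

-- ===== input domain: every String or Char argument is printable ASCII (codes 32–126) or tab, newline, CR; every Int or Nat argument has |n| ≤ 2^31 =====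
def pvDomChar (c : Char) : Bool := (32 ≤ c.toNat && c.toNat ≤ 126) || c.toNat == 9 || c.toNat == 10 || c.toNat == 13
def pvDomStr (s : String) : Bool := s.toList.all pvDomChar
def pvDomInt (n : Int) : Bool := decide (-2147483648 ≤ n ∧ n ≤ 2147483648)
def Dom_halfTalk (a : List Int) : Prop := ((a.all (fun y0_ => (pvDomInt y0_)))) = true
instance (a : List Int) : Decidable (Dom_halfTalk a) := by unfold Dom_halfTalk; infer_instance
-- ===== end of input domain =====

-- B replaces A's stateful rotation of the right half by stateless modular indexing; objective: simpler.

-- ===== PORT A =====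
-- talk(first, second): pairs first[i] with second[i]; indices are always in range when called
-- from halfTalk (len(second) ≥ len(first)), so getD's default is a mere totalization guard.
def pvTalk (first second : List Int) : List (Int × Int) :=
  (List.range first.length).map (fun i => (first.getD i 0, second.getD i 0))

-- permutate(a): a.append(a.pop(0)). On [] Python would raise, but halfTalk never calls it on [].
def pvPermutate (a : List Int) : List Int :=
  match a with
  | [] => []
  | h :: t => t ++ [h]

def halfTalk (a : List Int) : List (List (Int × Int)) :=
  let middle := a.length / 2
  let left := a.take middle
  let right := a.drop middle
  let st := (List.range left.length).foldl
    (fun (p : List Int × List (List (Int × Int))) _ =>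
      let r' := pvPermutate p.1
      (r', p.2 ++ [pvTalk left r'])) (right, [])
  st.2

-- ===== PORT B =====
def halfTalk_alt (a : List Int) : List (List (Int × Int)) :=
  let middle := a.length / 2
  let left := a.take middle
  let right := a.drop middle
  (List.range' 1 left.length).map (fun r =>
    (List.range left.length).map (fun i =>
      (left.getD i 0, right.getD ((i + r) % right.length) 0)))

-- ===== PRECONDITION & SPEC =====
def Spec_halfTalk (a : List Int) (out : List (List (Int × Int))) : Prop := out = halfTalk_alt a
instance (a : List Int) (out : List (List (Int × Int))) : Decidable (Spec_halfTalk a out) := by unfold Spec_halfTalk; infer_instance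

-- ===== CLAIM (what is proved, stated in full; the proofs are below) =====
def Claim_equal_halfTalk : Prop := ∀ (a : List Int), Dom_halfTalk a → Spec_halfTalk a (halfTalk a)

-- ===== LEMMAS AND PROOFS =====

theorem pvPermutate_eq_rotate (l : List Int) : pvPermutate l = l.rotate 1 := by
  cases l with
  | nil => rfl
  | cons h t => simp [pvPermutate, List.rotate_cons_succ]

theorem halfTalk_loop (left right : List Int) (k : Nat) :
    (List.range k).foldl
      (fun (p : List Int × List (List (Int × Int))) _ =>
        let r' := pvPermutate p.1
        (r', p.2 ++ [pvTalk left r'])) (right, [])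
    = (right.rotate k, (List.range' 1 k).map (fun r => pvTalk left (right.rotate r))) := by
  induction k with
  | zero => simp
  | succ n ih =>
    rw [List.range_succ, List.foldl_append, ih]
    simp [pvPermutate_eq_rotate, List.rotate_rotate, List.range'_concat, Nat.add_comm]

theorem pvTalk_rotate (left right : List Int) (h : left.length ≤ right.length) (r : Nat) :
    pvTalk left (right.rotate r) =
      (List.range left.length).map (fun i =>
        (left.getD i 0, right.getD ((i + r) % right.length) 0)) := by
  unfold pvTalk
  apply List.map_congr_left
  intro i hi
  rw [List.mem_range] at hi
  have hr : 0 < right.length := by omega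
  have hi' : i < (right.rotate r).length := by simpa using lt_of_lt_of_le hi h
  have hm : (i + r) % right.length < right.length := Nat.mod_lt _ hr
  rw [List.getD_eq_getElem _ _ hi', List.getD_eq_getElem _ _ hm, List.getElem_rotate]

-- ===== VERDICT (by name: the statement is the Claim_ definition above) =====
theorem halfTalk_spec : Claim_equal_halfTalk := by
  intro a _
  unfold Spec_halfTalk
  simp only [halfTalk, halfTalk_alt]
  rw [halfTalk_loop]
  apply List.map_congr_left
  intro r hr
  have hmem := List.mem_range'_1.mp hr
  apply pvTalk_rotate
  simp [Nat.div_le_iff_le_mul_add_pred]; omega
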